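-- pv_equiv track=rewrite | github.com/tinymins/MYArchived | !src-dist/plib/semver.py | _smaller_id_list
-- ===== SOURCE A (Python) =====
-- from typing import Optional, Union, List, Tuple
--
-- def _compare(a, b):
--     """Compare two values, return -1, 0, or 1"""
--     if a == b:
--         return 0
--     return -1 if a < b else 1
--
-- def _compare_ids(my_id: Optional[str], other_id: Optional[str]) -> int:
--     """Compare two version component IDs"""
--     if my_id == other_id:
--         return 0
--     if my_id is None:
--         return -1
--     if other_id is None:
--         return 1
--
--     # Try to convert to numbers
--     try:
--         my_number = int(my_id)
--         try:
--             other_number = int(other_id)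
--             # Both are numbers
--             return _compare(my_number, other_number)
--         except ValueError:
--             # my_id is number, other_id is not
--             return -1
--     except ValueError:
--         try:
--             int(other_id)
--             # my_id is not number, other_id is number
--             return 1
--         except ValueError:
--             # Both are strings
--             return _compare(my_id, other_id)
--
-- def _smaller_id_list(my_ids: List[str], other_ids: List[str]) -> bool:
--     """Check if my_ids list is smaller than other_ids list"""
--     my_length = len(my_ids)
--
--     for i in range(my_length):
--         if i >= len(other_ids):
--             break
--         comparison = _compare_ids(my_ids[i], other_ids[i])
--         if comparison != 0:
--             return comparison == -1
--
--     return my_length < len(other_ids)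
-- ===== SOURCE B (Python) =====
-- def _smaller_id_list(my_ids, other_ids):
--     """Check if my_ids list is smaller than other_ids list."""
--     def key(x):
--         try:
--             return (1, int(x), '')
--         except ValueError:
--             return (2, 0, x)
--     return [key(x) for x in my_ids] < [key(x) for x in other_ids]
-- ===== Notes on version B (the rewrite author's own statement) =====
-- stated objective: idiomatic
-- what changed: Replaces A's manual index loop with a per-element three-way comparator and length fallback by mapping each id once to a sortable key tuple (numeric ids before string ids) and returning one built-in lexicographic list comparison.
import Mathlib
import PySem

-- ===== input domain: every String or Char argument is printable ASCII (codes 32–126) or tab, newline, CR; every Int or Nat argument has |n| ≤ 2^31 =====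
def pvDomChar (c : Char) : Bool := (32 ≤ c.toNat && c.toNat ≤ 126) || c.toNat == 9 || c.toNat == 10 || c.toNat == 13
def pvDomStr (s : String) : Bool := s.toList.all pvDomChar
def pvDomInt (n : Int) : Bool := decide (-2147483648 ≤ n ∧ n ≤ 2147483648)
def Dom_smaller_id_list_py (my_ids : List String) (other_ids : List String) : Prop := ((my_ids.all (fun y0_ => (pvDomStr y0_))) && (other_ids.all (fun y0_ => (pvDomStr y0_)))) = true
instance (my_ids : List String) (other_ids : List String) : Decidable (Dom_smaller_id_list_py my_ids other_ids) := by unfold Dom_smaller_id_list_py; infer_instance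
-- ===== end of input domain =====

-- B replaces A's index loop + three-way comparator + length fallback by mapping each id to a
-- sortable key and doing one lexicographic list comparison (idiomatic; same cost).

-- ===== PORT A =====
-- _compare, specialised to the two types it is called at (ints and strings)
def pvCompareInt (a b : Int) : Int := if a = b then 0 else if a < b then -1 else 1
def pvCompareStr (a b : String) : Int := if a = b then 0 else if a < b then -1 else 1

-- _compare_ids; the 'is None' branches are unreachable at type str and have no counterpart here
def pvCompareIds (my_id other_id : String) : Int :=
  if my_id = other_id then 0
  else
    match PySem.Int.ofStr? my_id with
    | some my_number =>
      match PySem.Int.ofStr? other_id with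
      | some other_number => pvCompareInt my_number other_number
      | none => -1
    | none =>
      match PySem.Int.ofStr? other_id with
      | some _ => 1
      | none => pvCompareStr my_id other_id

-- the for-i loop of _smaller_id_list, with the break and the final length test
def pvLoopA (my_ids other_ids : List String) (i : Nat) : Bool :=
  if i < my_ids.length then
    if other_ids.length ≤ i then decide (my_ids.length < other_ids.length)
    else
      match PySem.List.pyGet? my_ids (i : Int), PySem.List.pyGet? other_ids (i : Int) with
      | some a, some b =>
        let comparison := pvCompareIds a b
        if comparison ≠ 0 then decide (comparison = -1)
        else pvLoopA my_ids other_ids (i + 1)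
      | _, _ => false   -- unreachable: i is in range for both lists
  else decide (my_ids.length < other_ids.length)
termination_by my_ids.length - i

def smaller_id_list_py (my_ids : List String) (other_ids : List String) : Bool :=
  pvLoopA my_ids other_ids 0

-- ===== PORT B =====
-- key(x): (1, int(x), '') if int-parseable else (2, 0, x); tags collapse into a tagged value
inductive PvKey where
  | num : Int → PvKey
  | str : String → PvKey
deriving DecidableEq

def pvKeyOf (s : String) : PvKey :=
  match PySem.Int.ofStr? s with
  | some n => .num n
  | none => .str s

-- '<' on two keys (Python tuple comparison, tags first)
def pvKeyLt : PvKey → PvKey → Bool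
  | .num m, .num n => decide (m < n)
  | .num _, .str _ => true
  | .str _, .num _ => false
  | .str a, .str b => decide (a < b)

-- Python's built-in lexicographic '<' on lists of keys
def pvListLt : List PvKey → List PvKey → Bool
  | _, [] => false
  | [], _ :: _ => true
  | a :: as, b :: bs => if a = b then pvListLt as bs else pvKeyLt a b

def smaller_id_list_py_alt (my_ids : List String) (other_ids : List String) : Bool :=
  pvListLt (my_ids.map pvKeyOf) (other_ids.map pvKeyOf)

-- ===== PRECONDITION & SPEC =====
def Spec_smaller_id_list_py (my_ids : List String) (other_ids : List String) (out : Bool) : Prop := out = smaller_id_list_py_alt my_ids other_ids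
instance (my_ids : List String) (other_ids : List String) (out : Bool) : Decidable (Spec_smaller_id_list_py my_ids other_ids out) := by unfold Spec_smaller_id_list_py; infer_instance

-- ===== CLAIM (what is proved, stated in full; the proofs are below) =====
def Claim_equal_smaller_id_list_py : Prop := ∀ (my_ids : List String) (other_ids : List String), Dom_smaller_id_list_py my_ids other_ids → Spec_smaller_id_list_py my_ids other_ids (smaller_id_list_py my_ids other_ids)

-- ===== LEMMAS AND PROOFS =====

-- A's three-way comparator returns 0 exactly when the two keys coincide
theorem pvCompareIds_eq_zero_iff (a b : String) :
    pvCompareIds a b = 0 ↔ pvKeyOf a = pvKeyOf b := by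
  unfold pvCompareIds pvKeyOf pvCompareInt pvCompareStr
  by_cases hab : a = b
  · simp [hab]
  · simp only [if_neg hab]
    cases ha : PySem.Int.ofStr? a <;> cases hb : PySem.Int.ofStr? b <;>
      simp_all <;> split_ifs <;> simp_all <;> omega
  
-- when the keys differ, A's comparator says -1 exactly when B's key is strictly smaller
theorem pvCompareIds_neg_one_iff (a b : String) (h : pvKeyOf a ≠ pvKeyOf b) :
    (pvCompareIds a b = -1) ↔ pvKeyLt (pvKeyOf a) (pvKeyOf b) = true := by
  unfold pvCompareIds pvKeyOf pvKeyLt at *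
  by_cases hab : a = b
  · subst hab; cases ha : PySem.Int.ofStr? a <;> simp_all
  · simp only [if_neg hab]
    cases ha : PySem.Int.ofStr? a <;> cases hb : PySem.Int.ofStr? b <;>
      simp_all [pvCompareInt, pvCompareStr] <;> split_ifs <;> simp_all <;> omega

-- loop invariant: A's loop from index i computes B's list comparison on the suffixes
theorem pvLoopA_eq (my_ids other_ids : List String) (i : Nat)
    (h1 : i ≤ my_ids.length) (h2 : i ≤ other_ids.length) :
    pvLoopA my_ids other_ids i
      = pvListLt ((my_ids.drop i).map pvKeyOf) ((other_ids.drop i).map pvKeyOf) := by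
  rw [pvLoopA]
  by_cases hm : i < my_ids.length
  · simp only [if_pos hm]
    by_cases ho : other_ids.length ≤ i
    · have : i = other_ids.length := le_antisymm h2 ho
      subst this
      simp only [if_pos ho, List.drop_length, List.map_nil]
      have hd : (my_ids.drop other_ids.length).map pvKeyOf ≠ [] := by
        simp [List.drop_eq_nil_iff]; omega
      cases hh : (my_ids.drop other_ids.length).map pvKeyOf with
      | nil => exact absurd hh hd
      | cons x xs => simp [pvListLt]; omega
    · have ho' : i < other_ids.length := by omega
      simp only [if_neg ho]
      have hga : PySem.List.pyGet? my_ids (i : Int) = some my_ids[i] := by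
        simp [PySem.List.pyGet?, PySem.List.pyIdx?, hm]
      have hgb : PySem.List.pyGet? other_ids (i : Int) = some other_ids[i] := by
        simp [PySem.List.pyGet?, PySem.List.pyIdx?, ho']
      rw [hga, hgb]
      have hda : my_ids.drop i = my_ids[i] :: my_ids.drop (i + 1) :=
        (List.getElem_cons_drop hm).symm
      have hdb : other_ids.drop i = other_ids[i] :: other_ids.drop (i + 1) :=
        (List.getElem_cons_drop ho').symm
      rw [hda, hdb]
      simp only [List.map_cons, pvListLt]
      by_cases hk : pvKeyOf my_ids[i] = pvKeyOf other_ids[i]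
      · have hc0 : pvCompareIds my_ids[i] other_ids[i] = 0 :=
          (pvCompareIds_eq_zero_iff _ _).mpr hk
        simp only [hc0, if_pos hk]
        simpa using pvLoopA_eq my_ids other_ids (i + 1) (by omega) (by omega)
      · have hc0 : pvCompareIds my_ids[i] other_ids[i] ≠ 0 := by
          intro h0; exact hk ((pvCompareIds_eq_zero_iff _ _).mp h0)
        simp only [if_neg hk, hc0, if_pos, ne_eq, not_false_eq_true]
        have := pvCompareIds_neg_one_iff my_ids[i] other_ids[i] hk
        by_cases hlt : pvKeyLt (pvKeyOf my_ids[i]) (pvKeyOf other_ids[i]) = true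
        · simp [hlt, this.mpr hlt]
        · have : pvCompareIds my_ids[i] other_ids[i] ≠ -1 := fun hc => hlt (this.mp hc)
          simp [this, Bool.eq_false_iff.mpr hlt]
  · have : i = my_ids.length := le_antisymm h1 (by omega)
    subst this
    simp only [if_neg hm, List.drop_length, List.map_nil]
    cases hh : (other_ids.drop my_ids.length).map pvKeyOf with
    | nil =>
      simp only [pvListLt]
      simp only [List.map_eq_nil_iff, List.drop_eq_nil_iff] at hh
      simp; omega
    | cons x xs =>
      have : other_ids.drop my_ids.length ≠ [] := by
        intro h0; simp [h0] at hh
      simp only [pvListLt]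
      simp [List.drop_eq_nil_iff] at this
      simp; omega
termination_by my_ids.length - i

-- ===== VERDICT (by name: the statement is the Claim_ definition above) =====
theorem smaller_id_list_py_spec : Claim_equal_smaller_id_list_py := by
  intro my_ids other_ids _
  unfold Spec_smaller_id_list_py smaller_id_list_py smaller_id_list_py_alt
  simpa using pvLoopA_eq my_ids other_ids 0 (Nat.zero_le _) (Nat.zero_le _)
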